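-- pv_equiv track=rewrite | github.com/Timofeyyy1/AITelegramBotContentPlan | app/utils/message_utils.py | has_unclosed_markdown
-- ===== SOURCE A (Python) =====
-- def has_unclosed_markdown(text: str) -> bool:
--
--     bold_count = text.count('**')
--     if bold_count % 2 != 0:
--         return True # Есть незакрытый **
--
--     # Считаем баланс тегов
--     balance_bold = 0
--     balance_italic = 0
--     i = 0
--     while i < len(text):
--         if text[i:i+2] == '**':
--             if balance_bold == 0:
--                 balance_bold += 1
--             else:
--                 balance_bold -= 1
--             i += 2
--         elif text[i] == '_':
--
--             if (i == 0 or not text[i-1].isalnum()) and \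
--                (i == len(text) - 1 or not text[i+1].isalnum()):
--                 if balance_italic == 0:
--                     balance_italic += 1
--                 else:
--                     balance_italic -= 1
--             i += 1
--         else:
--             i += 1
--
--     return balance_bold != 0 or balance_italic != 0
-- ===== SOURCE B (Python) =====
-- def has_unclosed_markdown(text: str) -> bool:
--     # Parity view: unclosed iff the '**' count is odd, or the number of
--     # "valid" underscores (non-alnum on both sides) is odd.
--     if text.count('**') % 2 != 0:
--         return True
--     chars = list(text)
--     valid = 0
--     for prev, cur, nxt in zip([None] + chars, chars, chars[1:] + [None]):
--         if cur == '_' and (prev is None or not prev.isalnum()) \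
--                       and (nxt is None or not nxt.isalnum()):
--             valid += 1
--     return valid % 2 != 0
-- ===== Notes on version B (the rewrite author's own statement) =====
-- stated objective: simpler
-- what changed: Replaces the index-based toggling state machine (bold/italic balance counters with a 2-character skip) by two independent parity counts: the parity of the double-asterisk count plus the parity of valid underscores found by zipping each character with its neighbours.
import Mathlib
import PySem

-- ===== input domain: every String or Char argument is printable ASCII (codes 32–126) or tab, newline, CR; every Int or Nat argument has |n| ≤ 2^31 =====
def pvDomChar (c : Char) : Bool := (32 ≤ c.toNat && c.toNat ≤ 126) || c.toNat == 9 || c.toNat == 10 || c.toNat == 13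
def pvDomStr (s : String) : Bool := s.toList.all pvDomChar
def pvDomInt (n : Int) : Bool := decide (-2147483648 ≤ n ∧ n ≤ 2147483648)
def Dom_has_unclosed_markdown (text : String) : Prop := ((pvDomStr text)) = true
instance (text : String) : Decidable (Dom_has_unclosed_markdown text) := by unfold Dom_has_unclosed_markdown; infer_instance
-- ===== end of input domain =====

-- B replaces A's toggling balance state machine by two independent parity counts (simpler; a timing run measured it faster by a constant factor).

-- ===== PORT A =====
-- the while loop: i becomes the remaining suffix, text[i-1] the carried `prev`
def pvLoopA : List Char → Option Char → Int → Int → Int × Int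
  | [], _, bb, bi => (bb, bi)
  | c :: rest, prev, bb, bi =>
    if c = '*' ∧ rest.head? = some '*' then
      pvLoopA rest.tail (some '*') (if bb = 0 then bb + 1 else bb - 1) bi
    else if c = '_' then
      pvLoopA rest (some c) bb
        (if (prev.all fun p => !PySem.Chars.isalnum p) && (rest.head?.all fun q => !PySem.Chars.isalnum q)
         then (if bi = 0 then bi + 1 else bi - 1) else bi)
    else pvLoopA rest (some c) bb bi
  termination_by cs _ _ _ => cs.length
  decreasing_by all_goals (simp [List.length_tail]; try omega)

def has_unclosed_markdown (text : String) : Bool :=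
  if PySem.Str.count text "**" % 2 ≠ 0 then true
  else
    let r := pvLoopA text.toList none 0 0
    (r.1 != 0) || (r.2 != 0)

-- ===== PORT B =====
def pvOkB (oc : Option Char) : Bool := oc.all fun p => !PySem.Chars.isalnum p

def has_unclosed_markdown_alt (text : String) : Bool :=
  if PySem.Str.count text "**" % 2 ≠ 0 then true
  else
    let chars := text.toList
    let valid := (List.zip (none :: chars.map some) (List.zip chars (chars.tail.map some ++ [none]))).countP
      (fun t => t.2.1 == '_' && pvOkB t.1 && pvOkB t.2.2)
    valid % 2 != 0

-- ===== PRECONDITION & SPEC =====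
def Spec_has_unclosed_markdown (text : String) (out : Bool) : Prop := out = has_unclosed_markdown_alt text
instance (text : String) (out : Bool) : Decidable (Spec_has_unclosed_markdown text out) := by unfold Spec_has_unclosed_markdown; infer_instance

-- ===== CLAIM (what is proved, stated in full; the proofs are below) =====
def Claim_equal_has_unclosed_markdown : Prop := ∀ (text : String), Dom_has_unclosed_markdown text → Spec_has_unclosed_markdown text (has_unclosed_markdown text)

-- ===== LEMMAS AND PROOFS =====

-- the number of non-overlapping '**' matches the while loop consumes
def pvBold : List Char → Nat
  | [] => 0
  | c :: rest => if c = '*' ∧ rest.head? = some '*' then pvBold rest.tail + 1 else pvBold rest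
  termination_by cs => cs.length
  decreasing_by all_goals (simp [List.length_tail]; try omega)

-- the number of valid underscores, carrying the previous character
def pvVal : Option Char → List Char → Nat
  | _, [] => 0
  | prev, c :: rest =>
    (if c == '_' && pvOkB prev && pvOkB rest.head? then 1 else 0) + pvVal (some c) rest

-- toggle a {0,1} balance n times
def pvTog (b : Int) (n : Nat) : Int := if n % 2 = 0 then b else 1 - b

lemma pvTog_succ (b : Int) (n : Nat) (hb : b = 0 ∨ b = 1) :
    pvTog b (n + 1) = pvTog (if b = 0 then b + 1 else b - 1) n := by
  rcases hb with rfl | rfl <;> unfold pvTog <;> split_ifs <;> omega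

lemma pvLoopA_spec : ∀ (n : Nat) (cs : List Char), cs.length ≤ n → ∀ (prev : Option Char) (bb bi : Int),
    (bb = 0 ∨ bb = 1) → (bi = 0 ∨ bi = 1) →
    pvLoopA cs prev bb bi = (pvTog bb (pvBold cs), pvTog bi (pvVal prev cs)) := by
  intro n
  induction n with
  | zero =>
    intro cs hcs prev bb bi hb hi
    have : cs = [] := by cases cs <;> simp_all
    subst this; simp [pvLoopA, pvBold, pvVal, pvTog]
  | succ n ih =>
    intro cs hcs prev bb bi hb hi
    cases cs with
    | nil => simp [pvLoopA, pvBold, pvVal, pvTog]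
    | cons c rest =>
      by_cases hst : c = '*' ∧ rest.head? = some '*'
      · obtain ⟨rfl, hh⟩ := hst
        cases rest with
        | nil => simp at hh
        | cons d rest' =>
          have hd : d = '*' := by simpa using hh
          subst hd
          rw [pvLoopA, if_pos ⟨rfl, by simp⟩]
          simp only [List.tail_cons]
          rw [ih rest' (by simp at hcs; omega) (some '*') _ bi (by rcases hb with rfl | rfl <;> simp) hi]
          have h1 : pvBold ('*' :: '*' :: rest') = pvBold rest' + 1 := by
            rw [pvBold]; simp
          have h2 : pvVal prev ('*' :: '*' :: rest') = pvVal (some '*') rest' := by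
            rw [pvVal, pvVal]; simp
          rw [h1, h2, pvTog_succ bb (pvBold rest') hb]
      · by_cases hu : c = '_'
        · subst hu
          rw [pvLoopA, if_neg hst, if_pos rfl]
          by_cases hok : ((prev.all fun p => !PySem.Chars.isalnum p) && (rest.head?.all fun q => !PySem.Chars.isalnum q)) = true
          · rw [if_pos hok]
            rw [ih rest (by simp at hcs; omega) (some '_') bb _ hb (by rcases hi with rfl | rfl <;> simp)]
            obtain ⟨hA, hB⟩ := Bool.and_eq_true_iff.mp hok
            have h1 : pvBold ('_' :: rest) = pvBold rest := by
              rw [pvBold, if_neg hst]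
            have h2 : pvVal prev ('_' :: rest) = pvVal (some '_') rest + 1 := by
              rw [pvVal]; simp [pvOkB, hA, hB, Nat.add_comm]
            rw [h1, h2, pvTog_succ bi (pvVal (some '_') rest) hi]
          · rw [if_neg hok]
            rw [ih rest (by simp at hcs; omega) (some '_') bb bi hb hi]
            have h1 : pvBold ('_' :: rest) = pvBold rest := by
              rw [pvBold, if_neg hst]
            have h2 : pvVal prev ('_' :: rest) = pvVal (some '_') rest := by
              rw [pvVal]; simp [pvOkB, hok]
            rw [h1, h2]
        · rw [pvLoopA, if_neg hst, if_neg hu]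
          rw [ih rest (by simp at hcs; omega) (some c) bb bi hb hi]
          have h1 : pvBold (c :: rest) = pvBold rest := by
            rw [pvBold, if_neg hst]
          have h2 : pvVal prev (c :: rest) = pvVal (some c) rest := by
            rw [pvVal]; simp [hu]
          rw [h1, h2]

lemma pvBold_eq_count : ∀ (fuel : Nat) (l : List Char) (acc : Nat), l.length ≤ fuel →
    PySem.Chars.count.go ['*','*'] fuel l acc = acc + pvBold l := by
  intro fuel
  induction fuel with
  | zero =>
    intro l acc hl
    have : l = [] := by cases l <;> simp_all
    subst this; simp [PySem.Chars.count.go, pvBold]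
  | succ n ih =>
    intro l acc hl
    cases l with
    | nil => simp [PySem.Chars.count.go, pvBold]
    | cons h t =>
      rw [PySem.Chars.count.go]
      by_cases hp : List.isPrefixOf ['*','*'] (h :: t) = true
      · rw [if_pos hp]
        cases t with
        | nil => simp [List.isPrefixOf] at hp
        | cons d t' =>
          simp only [List.isPrefixOf, Bool.and_true, Bool.and_eq_true, beq_iff_eq] at hp
          obtain ⟨h1, h2⟩ := hp
          subst h1; subst h2
          simp only [List.length_cons, List.length_nil, List.drop_succ_cons, List.drop_zero,
            Nat.zero_add, Nat.reduceAdd]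
          rw [ih t' (acc + 1) (by simp at hl; omega)]
          rw [pvBold, if_pos ⟨rfl, by simp⟩]
          simp only [List.tail_cons]
          omega
      · rw [if_neg hp]
        rw [ih t acc (by simp at hl; omega)]
        have hnot : ¬ (h = '*' ∧ t.head? = some '*') := by
          rintro ⟨rfl, hh⟩
          cases t with
          | nil => simp at hh
          | cons d t' =>
            have : d = '*' := by simpa using hh
            subst this
            simp [List.isPrefixOf] at hp
        rw [pvBold, if_neg hnot]

lemma pvZip_valid : ∀ (cs : List Char) (prev : Option Char),
    (List.zip (prev :: cs.map some) (List.zip cs (cs.tail.map some ++ [none]))).countP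
      (fun t => t.2.1 == '_' && pvOkB t.1 && pvOkB t.2.2) = pvVal prev cs := by
  intro cs
  induction cs with
  | nil => intro prev; simp [pvVal]
  | cons c rest ih =>
    intro prev
    have hzip : List.zip (c :: rest) (rest.map some ++ [none]) =
        (c, rest.head?) :: List.zip rest (rest.tail.map some ++ [none]) := by
      cases rest <;> simp
    simp only [List.map_cons, List.tail_cons, hzip, List.zip_cons_cons, List.countP_cons]
    rw [ih (some c)]
    rw [pvVal]
    omega

-- ===== VERDICT (by name: the statement is the Claim_ definition above) =====
theorem has_unclosed_markdown_spec : Claim_equal_has_unclosed_markdown := by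
  intro text _
  unfold Spec_has_unclosed_markdown has_unclosed_markdown has_unclosed_markdown_alt
  by_cases h : PySem.Str.count text "**" % 2 ≠ 0
  · rw [if_pos h, if_pos h]
  · rw [if_neg h, if_neg h]
    have hcount : PySem.Chars.count text.toList ['*','*'] = pvBold text.toList := by
      unfold PySem.Chars.count
      rw [if_neg (by simp)]
      simpa using pvBold_eq_count _ _ 0 le_rfl
    have heven : pvBold text.toList % 2 = 0 := by
      rw [← hcount]
      have := h
      simp only [PySem.Str.count, ne_eq, not_not] at this ⊢
      simpa using this
    rw [pvLoopA_spec text.toList.length text.toList le_rfl none 0 0 (Or.inl rfl) (Or.inl rfl)]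
    simp only [pvZip_valid]
    by_cases hv : pvVal none text.toList % 2 = 0
    · simp [pvTog, heven, hv]
    · simp [pvTog, heven, hv]; omega
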